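-- pv_equiv track=rewrite | github.com/palsoftware/pastiera | scripts/backup_truncate_and_convert.py | generate_deletes
-- ===== SOURCE A (Python) =====
-- def generate_deletes(term: str, max_distance: int):
--     """Generate all delete variants for SymSpell."""
--     deletes = set()
--
--     def recurse(current: str, d: int):
--         if d == 0:
--             return
--         for i in range(len(current)):
--             deleted = current[:i] + current[i + 1 :]
--             if deleted not in deletes:
--                 deletes.add(deleted)
--                 recurse(deleted, d - 1)
--
--     recurse(term, max_distance)
--     return deletes
-- ===== SOURCE B (Python) =====
-- def generate_deletes(term: str, max_distance: int):
--     """Generate all delete variants for SymSpell (iterative, explicit work stack)."""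
--     deletes = set()
--     stack = [(term, max_distance, 0)]
--     while stack:
--         current, d, i = stack.pop()
--         if d == 0 or i >= len(current):
--             continue
--         deleted = current[:i] + current[i + 1:]
--         stack.append((current, d, i + 1))
--         if deleted not in deletes:
--             deletes.add(deleted)
--             stack.append((deleted, d - 1, 0))
--     return deletes
-- ===== Notes on version B (the rewrite author's own statement) =====
-- stated objective: alternative
-- what changed: The nested recursive closure mutating an enclosing set is replaced by an iterative worklist: an explicit stack of (string, remaining-distance, next-index) frames processed in a while loop, with no recursion.
import Mathlib
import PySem

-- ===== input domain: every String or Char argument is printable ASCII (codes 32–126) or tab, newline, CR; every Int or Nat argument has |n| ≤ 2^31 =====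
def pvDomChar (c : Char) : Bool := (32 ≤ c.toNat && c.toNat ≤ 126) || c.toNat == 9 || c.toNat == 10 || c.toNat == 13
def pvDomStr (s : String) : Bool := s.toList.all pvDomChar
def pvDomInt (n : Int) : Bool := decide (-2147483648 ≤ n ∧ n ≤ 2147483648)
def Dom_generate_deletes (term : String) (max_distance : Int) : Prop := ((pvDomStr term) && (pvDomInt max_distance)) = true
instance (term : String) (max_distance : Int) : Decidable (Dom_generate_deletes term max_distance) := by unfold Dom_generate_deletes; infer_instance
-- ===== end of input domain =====

-- B replaces A's nested recursive closure by an explicit-stack iterative worklist (alternative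
-- decomposition, same cost). Strings are modelled as List Char and the Python set of strings as a
-- PySem.Set (List Char) in insertion order, wrapped with String.ofList at return (set compared as a set).

-- ===== PORT A =====
-- shared transliteration of the source expression `current[:i] + current[i+1:]` (exact: PySem slices)
def pvDel (cur : List Char) (i : Nat) : List Char :=
  PySem.List.slice cur none (some (i : Int)) ++ PySem.List.slice cur (some ((i : Int) + 1)) none

-- length fact the ports' termination proofs cite
theorem pvDel_length (cur : List Char) (i : Nat) (h : i < cur.length) :
    (pvDel cur i).length = cur.length - 1 := by
  have h1 : PySem.List.slice cur none (some (i : Int)) = cur.take i :=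
    PySem.List.slice_to_natCast cur i
  have h2 : PySem.List.slice cur (some ((i : Int) + 1)) none = cur.drop (i + 1) := by
    have := PySem.List.slice_from_natCast cur (i + 1)
    push_cast at this
    exact this
  simp [pvDel, h1, h2]
  omega

mutual
-- Python's inner `def recurse(current, d)`: the `if d == 0: return` guard
def recurseA (cur : List Char) (d : Int) (s : PySem.Set (List Char)) : PySem.Set (List Char) :=
  if d = 0 then s else loopA cur d 0 s
  termination_by (cur.length, cur.length + 1)
  decreasing_by exact Prod.Lex.right _ (by omega)
-- Python's `for i in range(len(current))` body, threading the mutated set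
def loopA (cur : List Char) (d : Int) (i : Nat) (s : PySem.Set (List Char)) : PySem.Set (List Char) :=
  if h : i < cur.length then
    let deleted := pvDel cur i
    loopA cur d (i + 1)
      (if PySem.Set.contains s deleted then s
       else recurseA deleted (d - 1) (PySem.Set.add s deleted))
  else s
  termination_by (cur.length, cur.length - i)
  decreasing_by
  · exact Prod.Lex.left _ _ (by rw [pvDel_length cur i h]; omega)
  · exact Prod.Lex.right _ (by omega)
end

def generate_deletes (term : String) (max_distance : Int) : List String :=
  (recurseA term.toList max_distance PySem.Set.empty).map (fun l => String.ofList l)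

-- ===== PORT B =====
-- termination measure for the worklist loop (proof device only; the loop itself is the port)
def pvMu : Nat → Nat
  | 0 => 0
  | n + 1 => (n + 1) * (2 + pvMu n)

def pvPsi (n i : Nat) : Nat := (n - i) * (2 + pvMu (n - 1))

def pvStackMeasure (st : List (List Char × Int × Nat)) : Nat :=
  (st.map (fun f => 1 + pvPsi f.1.length f.2.2)).sum

theorem pvPsi_zero (n : Nat) : pvPsi n 0 = pvMu n := by
  cases n with
  | zero => simp [pvPsi, pvMu]
  | succ m => simp [pvPsi, pvMu]

theorem pvPsi_succ (n i : Nat) (h : i < n) :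
    pvPsi n i = (2 + pvMu (n - 1)) + pvPsi n (i + 1) := by
  unfold pvPsi
  have : n - i = (n - (i + 1)) + 1 := by omega
  rw [this]
  ring

-- the while loop over the explicit stack; each frame is (current, d, next index i)
def runB (st : List (List Char × Int × Nat)) (s : PySem.Set (List Char)) : PySem.Set (List Char) :=
  match st with
  | [] => s
  | (cur, d, i) :: rest =>
    if d = 0 ∨ cur.length ≤ i then runB rest s
    else
      let deleted := pvDel cur i
      let st' := (cur, d, i + 1) :: rest
      if PySem.Set.contains s deleted then runB st' s
      else runB ((deleted, d - 1, 0) :: st') (PySem.Set.add s deleted)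
termination_by pvStackMeasure st
decreasing_by
  · simp only [pvStackMeasure, List.map_cons, List.sum_cons]; omega
  · simp only [pvStackMeasure, List.map_cons, List.sum_cons]
    have hlt : i < cur.length := by omega
    have := pvPsi_succ cur.length i hlt
    omega
  · simp only [pvStackMeasure, List.map_cons, List.sum_cons]
    have hlt : i < cur.length := by omega
    have hlen : (pvDel cur i).length = cur.length - 1 := pvDel_length cur i hlt
    rw [hlen, pvPsi_zero]
    have hstep := pvPsi_succ cur.length i hlt
    omega

def generate_deletes_alt (term : String) (max_distance : Int) : List String :=
  (runB [(term.toList, max_distance, 0)] PySem.Set.empty).map (fun l => String.ofList l)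

-- ===== PRECONDITION & SPEC =====
def Spec_generate_deletes (term : String) (max_distance : Int) (out : List String) : Prop := out = generate_deletes_alt term max_distance
instance (term : String) (max_distance : Int) (out : List String) : Decidable (Spec_generate_deletes term max_distance out) := by unfold Spec_generate_deletes; infer_instance

-- ===== CLAIM (what is proved, stated in full; the proofs are below) =====
def Claim_equal_generate_deletes : Prop := ∀ (term : String) (max_distance : Int), Dom_generate_deletes term max_distance → Spec_generate_deletes term max_distance (generate_deletes term max_distance)

-- ===== LEMMAS AND PROOFS =====

-- one fully processed frame transforms the set exactly as A's recursion-step does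
def pvStep (s : PySem.Set (List Char)) (f : List Char × Int × Nat) : PySem.Set (List Char) :=
  if f.2.1 = 0 then s else loopA f.1 f.2.1 f.2.2 s

theorem loopA_skip (cur : List Char) (d : Int) (i : Nat) (s : PySem.Set (List Char))
    (h : cur.length ≤ i) : loopA cur d i s = s := by
  rw [loopA.eq_def]
  simp [Nat.not_lt.mpr h]

theorem loopA_mem (cur : List Char) (d : Int) (i : Nat) (s : PySem.Set (List Char))
    (hi : i < cur.length) (hc : PySem.Set.contains s (pvDel cur i) = true) :
    loopA cur d i s = loopA cur d (i + 1) s := by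
  have hm : pvDel cur i ∈ s := by simpa using hc
  rw [loopA.eq_def]
  simp [hi, hm]

theorem loopA_new (cur : List Char) (d : Int) (i : Nat) (s : PySem.Set (List Char))
    (hi : i < cur.length) (hc : ¬ PySem.Set.contains s (pvDel cur i) = true) :
    loopA cur d i s
      = loopA cur d (i + 1) (recurseA (pvDel cur i) (d - 1) (PySem.Set.add s (pvDel cur i))) := by
  have hm : ¬ pvDel cur i ∈ s := by simpa using hc
  rw [loopA.eq_def]
  simp [hi, hm]

theorem runB_foldl (st : List (List Char × Int × Nat)) (s : PySem.Set (List Char)) :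
    runB st s = st.foldl pvStep s := by
  fun_induction runB st s with
  | case1 s => simp
  | case2 s cur d i rest h ih =>
      rw [List.foldl_cons, ih]
      congr 1
      unfold pvStep
      rcases h with h | h
      · simp [h]
      · simp only
        split
        · rfl
        · exact (loopA_skip cur d i s h).symm
  | case3 s cur d i rest h deleted st' hc ih =>
      rw [ih, List.foldl_cons, List.foldl_cons]
      congr 1
      unfold pvStep
      simp only
      have hd : ¬ d = 0 := by tauto
      have hi : i < cur.length := by omega
      rw [if_neg hd, if_neg hd]
      exact (loopA_mem cur d i s hi hc).symm
  | case4 s cur d i rest h deleted st' hc ih =>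
      rw [ih, List.foldl_cons, List.foldl_cons, List.foldl_cons]
      congr 1
      unfold pvStep
      simp only
      have hd : ¬ d = 0 := by tauto
      have hi : i < cur.length := by omega
      rw [if_neg hd, if_neg hd]
      rw [loopA_new cur d i s hi hc]
      congr 1
      rw [recurseA.eq_def]

-- ===== VERDICT (by name: the statement is the Claim_ definition above) =====
theorem generate_deletes_spec : Claim_equal_generate_deletes := by
  intro term md _
  unfold Spec_generate_deletes generate_deletes generate_deletes_alt
  rw [runB_foldl]
  simp only [List.foldl]
  rw [recurseA.eq_def]
  rfl
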